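-- pv_equiv track=rewrite | github.com/KrishPatel0111/final_project_NLP | extraction/output_format.py | calculate_preservation_status
-- ===== SOURCE A (Python) =====
-- def calculate_preservation_status(article_text: str, summary_text: str, cue_text: str) -> str:
--     """
--     Determine if a cue is preserved in the summary.
--
--     Args:
--         article_text: Full article text
--         summary_text: Full summary text
--         cue_text: The specific cue to check
--
--     Returns:
--         "Yes", "No", or "Partially"
--     """
--     cue_lower = cue_text.lower().strip()
--     summary_lower = summary_text.lower()
--
--     # Exact match
--     if cue_lower in summary_lower:
--         return "Yes"
--
--     # Check for partial matches (for multi-word expressions)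
--     if " " in cue_lower:
--         words = cue_lower.split()
--         matches = sum(1 for word in words if word in summary_lower)
--         if matches == len(words):
--             return "Yes"
--         elif matches > 0:
--             return "Partially"
--
--     return "No"
-- ===== SOURCE B (Python) =====
-- def calculate_preservation_status(article_text: str, summary_text: str, cue_text: str) -> str:
--     summary = summary_text.lower()
--     words = cue_text.lower().strip().split()
--     if not words:
--         return "Yes"
--     status = "Yes" if words[0] in summary else "No"
--     for w in words[1:]:
--         here = "Yes" if w in summary else "No"
--         if here != status:
--             status = "Partially"
--     return status
-- ===== Notes on version B (the rewrite author's own statement) =====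
-- stated objective: alternative
-- what changed: Replaces A's separate exact-phrase check plus count-matches-then-compare-to-length branching by a single three-valued fold: each cue word yields a 'Yes'/'No' verdict and a lattice merge (equal verdicts keep, mixed ones give 'Partially') folds them into the final status, with no counting and no phrase check.
-- intended difference: For cues whose stripped lowercased text contains whitespace such as a tab but no space character, is not itself a substring of the lowercased summary, yet has some whitespace-separated word that is: A's space-only guard skips the word check and returns 'No', while B merges per-word verdicts and returns 'Yes' or 'Partially', the intended word-level behaviour. — e.g. on calculate_preservation_status("", "a b", "a\tb"): A returns "No", B returns "Yes"
import Mathlib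
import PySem

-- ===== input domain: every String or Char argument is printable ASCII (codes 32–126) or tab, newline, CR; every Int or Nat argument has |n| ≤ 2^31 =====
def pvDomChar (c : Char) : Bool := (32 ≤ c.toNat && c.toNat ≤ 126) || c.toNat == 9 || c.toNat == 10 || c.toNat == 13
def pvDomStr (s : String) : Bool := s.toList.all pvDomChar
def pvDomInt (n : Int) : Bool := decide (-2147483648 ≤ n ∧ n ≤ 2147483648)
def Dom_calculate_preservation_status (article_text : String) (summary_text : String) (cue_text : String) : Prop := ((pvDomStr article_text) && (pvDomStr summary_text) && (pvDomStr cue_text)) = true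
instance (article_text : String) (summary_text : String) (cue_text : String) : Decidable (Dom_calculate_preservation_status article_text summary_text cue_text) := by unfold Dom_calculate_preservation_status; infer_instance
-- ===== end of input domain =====

-- B replaces A's phrase check and count-and-compare branching by a single three-valued fold that
-- merges per-word "Yes"/"No" verdicts into one status (alternative decomposition, same cost); on
-- space-free cues containing other whitespace B intentionally differs from A (see D_ below).
-- article_text is unused by both, as in the Python.

-- ===== PORT A =====
def calculate_preservation_status (article_text : String) (summary_text : String) (cue_text : String) : String :=
  let cue_lower := PySem.Str.strip (PySem.Str.lower cue_text)
  let summary_lower := PySem.Str.lower summary_text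
  if PySem.Str.isIn cue_lower summary_lower then "Yes"
  else if PySem.Str.isIn " " cue_lower then
    let words := PySem.Str.split₀ cue_lower
    let matched := words.foldl (fun acc word => acc + (if PySem.Str.isIn word summary_lower then 1 else 0)) 0
    if matched == words.length then "Yes"
    else if matched > 0 then "Partially"
    else "No"
  else "No"

-- ===== PORT B =====
def calculate_preservation_status_alt (article_text : String) (summary_text : String) (cue_text : String) : String :=
  let summary := PySem.Str.lower summary_text
  let words := PySem.Str.split₀ (PySem.Str.strip (PySem.Str.lower cue_text))
  match words with
  | [] => "Yes"
  | w0 :: rest =>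
    rest.foldl (fun status w =>
      let here := if PySem.Str.isIn w summary then "Yes" else "No"
      if here ≠ status then "Partially" else status)
      (if PySem.Str.isIn w0 summary then "Yes" else "No")

-- ===== PRECONDITION & SPEC =====
-- For cues whose stripped lowercased text contains whitespace such as a tab but no space character,
-- is not itself a substring of the lowercased summary, yet has some whitespace-separated word that is:
-- A's space-only guard skips the word check and returns "No", while B merges the word verdicts and
-- returns "Yes" or "Partially", the intended word-level behaviour.
def D_calculate_preservation_status (article_text : String) (summary_text : String) (cue_text : String) : Prop :=
  let cue := PySem.Str.strip (PySem.Str.lower cue_text)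
  let summ := PySem.Str.lower summary_text
  PySem.Str.isIn " " cue = false ∧ PySem.Str.isIn cue summ = false ∧
    ∃ w ∈ PySem.Str.split₀ cue, PySem.Str.isIn w summ = true

instance (article_text : String) (summary_text : String) (cue_text : String) : Decidable (D_calculate_preservation_status article_text summary_text cue_text) := by unfold D_calculate_preservation_status; infer_instance

def Spec_calculate_preservation_status (article_text : String) (summary_text : String) (cue_text : String) (out : String) : Prop := ¬ D_calculate_preservation_status article_text summary_text cue_text → out = calculate_preservation_status_alt article_text summary_text cue_text
instance (article_text : String) (summary_text : String) (cue_text : String) (out : String) : Decidable (Spec_calculate_preservation_status article_text summary_text cue_text out) := by unfold Spec_calculate_preservation_status; infer_instance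

def pvDiffWitness_calculate_preservation_status : String × String × String := ("", "a b", "a\tb")
def pvDiffWitnessOut_calculate_preservation_status : String × String := ("No", "Yes")

-- ===== CLAIM (what is proved, stated in full; the proofs are below) =====
def Claim_unchanged_calculate_preservation_status : Prop := ∀ (article_text : String) (summary_text : String) (cue_text : String), Dom_calculate_preservation_status article_text summary_text cue_text → Spec_calculate_preservation_status article_text summary_text cue_text (calculate_preservation_status article_text summary_text cue_text)
def Claim_changed_calculate_preservation_status : Prop := Dom_calculate_preservation_status (pvDiffWitness_calculate_preservation_status.1) (pvDiffWitness_calculate_preservation_status.2.1) (pvDiffWitness_calculate_preservation_status.2.2) ∧ D_calculate_preservation_status (pvDiffWitness_calculate_preservation_status.1) (pvDiffWitness_calculate_preservation_status.2.1) (pvDiffWitness_calculate_preservation_status.2.2) ∧ calculate_preservation_status (pvDiffWitness_calculate_preservation_status.1) (pvDiffWitness_calculate_preservation_status.2.1) (pvDiffWitness_calculate_preservation_status.2.2) = pvDiffWitnessOut_calculate_preservation_status.1 ∧ calculate_preservation_status_alt (pvDiffWitness_calculate_preservation_status.1) (pvDiffWitness_calculate_preservation_status.2.1) (pvDiffWitness_calculate_preservation_status.2.2)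 = pvDiffWitnessOut_calculate_preservation_status.2 ∧ pvDiffWitnessOut_calculate_preservation_status.1 ≠ pvDiffWitnessOut_calculate_preservation_status.2
def Claim_exact_calculate_preservation_status : Prop := ∀ (article_text : String) (summary_text : String) (cue_text : String), Dom_calculate_preservation_status article_text summary_text cue_text → D_calculate_preservation_status article_text summary_text cue_text → calculate_preservation_status article_text summary_text cue_text ≠ calculate_preservation_status_alt article_text summary_text cue_text

-- ===== LEMMAS AND PROOFS =====

-- the step function of B's fold, named for the proofs (defeq to the lambda in the port)
def pvStep (p : String → Bool) (status w : String) : String :=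
  let here := if p w then "Yes" else "No"
  if here ≠ status then "Partially" else status

theorem pv_fold_part (p : String → Bool) : ∀ (l : List String),
    l.foldl (pvStep p) "Partially" = "Partially" := by
  intro l
  induction l with
  | nil => rfl
  | cons w rest ih =>
    have hstep : pvStep p "Partially" w = "Partially" := by
      by_cases hp : p w = true <;> simp [pvStep, hp]
    simpa [List.foldl_cons, hstep] using ih

theorem pv_fold_yes (p : String → Bool) : ∀ (l : List String),
    (∀ w ∈ l, p w = true) → l.foldl (pvStep p) "Yes" = "Yes" := by
  intro l
  induction l with
  | nil => intro _; rfl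
  | cons w rest ih =>
    intro h
    have hstep : pvStep p "Yes" w = "Yes" := by simp [pvStep, h w (by simp)]
    simpa [List.foldl_cons, hstep] using ih (fun v hv => h v (by simp [hv]))

theorem pv_fold_no (p : String → Bool) : ∀ (l : List String),
    (∀ w ∈ l, p w = false) → l.foldl (pvStep p) "No" = "No" := by
  intro l
  induction l with
  | nil => intro _; rfl
  | cons w rest ih =>
    intro h
    have hstep : pvStep p "No" w = "No" := by simp [pvStep, h w (by simp)]
    simpa [List.foldl_cons, hstep] using ih (fun v hv => h v (by simp [hv]))

theorem pv_fold_part_of_true (p : String → Bool) : ∀ (l : List String),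
    (∃ w ∈ l, p w = true) → l.foldl (pvStep p) "No" = "Partially" := by
  intro l
  induction l with
  | nil => rintro ⟨w, hw, -⟩; simp at hw
  | cons w rest ih =>
    rintro ⟨v, hv, hpv⟩
    rcases List.mem_cons.mp hv with hv | hv
    · subst hv
      have hstep : pvStep p "No" v = "Partially" := by simp [pvStep, hpv]
      simpa [List.foldl_cons, hstep] using pv_fold_part p rest
    · by_cases hp : p w = true
      · have hstep : pvStep p "No" w = "Partially" := by simp [pvStep, hp]
        simpa [List.foldl_cons, hstep] using pv_fold_part p rest
      · have hstep : pvStep p "No" w = "No" := by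
          simp [pvStep, Bool.eq_false_iff.mpr hp]
        simpa [List.foldl_cons, hstep] using ih ⟨v, hv, hpv⟩

theorem pv_fold_part_of_false (p : String → Bool) : ∀ (l : List String),
    (∃ w ∈ l, p w = false) → l.foldl (pvStep p) "Yes" = "Partially" := by
  intro l
  induction l with
  | nil => rintro ⟨w, hw, -⟩; simp at hw
  | cons w rest ih =>
    rintro ⟨v, hv, hpv⟩
    rcases List.mem_cons.mp hv with hv | hv
    · subst hv
      have hstep : pvStep p "Yes" v = "Partially" := by simp [pvStep, hpv]
      simpa [List.foldl_cons, hstep] using pv_fold_part p rest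
    · by_cases hp : p w = true
      · have hstep : pvStep p "Yes" w = "Yes" := by simp [pvStep, hp]
        simpa [List.foldl_cons, hstep] using ih ⟨v, hv, hpv⟩
      · have hstep : pvStep p "Yes" w = "Partially" := by
          simp [pvStep, Bool.eq_false_iff.mpr hp]
        simpa [List.foldl_cons, hstep] using pv_fold_part p rest

theorem pv_fold_eq_no (p : String → Bool) : ∀ (l : List String) (st : String),
    l.foldl (pvStep p) st = "No" → st = "No" ∧ ∀ w ∈ l, p w = false := by
  intro l
  induction l with
  | nil => intro st h; exact ⟨h, by simp⟩
  | cons w rest ih =>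
    intro st h
    rw [List.foldl_cons] at h
    obtain ⟨hst, hrest⟩ := ih (pvStep p st w) h
    have hw : p w = false ∧ st = "No" := by
      by_cases hp : p w = true
      · exfalso
        rcases eq_or_ne st "Yes" with rfl | hne
        · simp [pvStep, hp] at hst
        · simp [pvStep, hp, Ne.symm hne] at hst
      · refine ⟨Bool.eq_false_iff.mpr hp, ?_⟩
        rcases eq_or_ne st "No" with rfl | hne
        · rfl
        · exfalso
          simp [pvStep, Bool.eq_false_iff.mpr hp, Ne.symm hne] at hst
    refine ⟨hw.2, ?_⟩
    intro v hv
    rcases List.mem_cons.mp hv with rfl | hv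
    · exact hw.1
    · exact hrest v hv


theorem pv_go_ne_nil : ∀ (s : List Char) (cur : List Char) (acc : List (List Char)),
    cur ≠ [] ∨ acc ≠ [] → PySem.Chars.split₀.go s cur acc ≠ [] := by
  intro s
  induction s with
  | nil =>
    intro cur acc h
    rcases h with h | h
    · simp [PySem.Chars.split₀.go, List.isEmpty_iff, h]
    · by_cases hc : cur = [] <;> simp [PySem.Chars.split₀.go, List.isEmpty_iff, hc, h]
  | cons c rest ih =>
    intro cur acc h
    by_cases hsp : PySem.Chars.isspace c = true
    · by_cases hc : cur = []
      · subst hc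
        simp only [PySem.Chars.split₀.go, hsp, if_true, List.isEmpty_nil]
        exact ih [] acc (Or.inr (h.resolve_left (by simp)))
      · simp only [PySem.Chars.split₀.go, hsp, if_true, List.isEmpty_iff, if_neg hc]
        exact ih [] (cur.reverse :: acc) (Or.inr (by simp))
    · simp only [PySem.Chars.split₀.go, hsp, Bool.false_eq_true, if_false]
      exact ih (c :: cur) acc (Or.inl (by simp))

theorem pv_go_nil_allspace : ∀ (s : List Char) (cur : List Char) (acc : List (List Char)),
    PySem.Chars.split₀.go s cur acc = [] → ∀ c ∈ s, PySem.Chars.isspace c = true := by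
  intro s
  induction s with
  | nil => intro _ _ _ c hc; simp at hc
  | cons c rest ih =>
    intro cur acc h d hd
    by_cases hsp : PySem.Chars.isspace c = true
    · rcases List.mem_cons.mp hd with hd | hd
      · subst hd; exact hsp
      · by_cases hc : cur = []
        · subst hc
          simp only [PySem.Chars.split₀.go, hsp, if_true, List.isEmpty_nil] at h
          exact ih [] acc h d hd
        · simp only [PySem.Chars.split₀.go, hsp, if_true, List.isEmpty_iff, if_neg hc] at h
          exact ih [] (cur.reverse :: acc) h d hd
    · exfalso
      simp only [PySem.Chars.split₀.go, hsp, Bool.false_eq_true, if_false] at h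
      exact pv_go_ne_nil rest (c :: cur) acc (Or.inl (by simp)) h

theorem pv_go_mem : ∀ (s : List Char) (cur : List Char) (acc : List (List Char)) (w : List Char),
    w ∈ PySem.Chars.split₀.go s cur acc → w ∈ acc ∨ w <:+: (cur.reverse ++ s) := by
  intro s
  induction s with
  | nil =>
    intro cur acc w h
    by_cases hc : cur.isEmpty = true
    · simp only [PySem.Chars.split₀.go, hc, if_true, List.mem_reverse] at h
      exact Or.inl h
    · simp only [PySem.Chars.split₀.go, hc, Bool.false_eq_true, if_false, List.reverse_cons] at h
      rcases (List.mem_append.mp h) with h | h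
      · exact Or.inl (List.mem_reverse.mp h)
      · have : w = cur.reverse := by simpa using h
        subst this; exact Or.inr (by simp)
  | cons c rest ih =>
    intro cur acc w h
    by_cases hsp : PySem.Chars.isspace c = true
    · by_cases hc : cur = []
      · subst hc
        simp only [PySem.Chars.split₀.go, hsp, if_true, List.isEmpty_nil] at h
        rcases ih [] acc w h with h' | h'
        · exact Or.inl h'
        · refine Or.inr (h'.trans ?_)
          simpa using (List.suffix_cons c rest).isInfix
      · simp only [PySem.Chars.split₀.go, hsp, if_true, List.isEmpty_iff, if_neg hc] at h
        rcases ih [] (cur.reverse :: acc) w h with h' | h'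
        · rcases List.mem_cons.mp h' with h'' | h''
          · subst h''
            exact Or.inr (List.prefix_append cur.reverse (c :: rest)).isInfix
          · exact Or.inl h''
        · refine Or.inr (h'.trans ?_)
          simpa using ((List.suffix_cons c rest).trans (List.suffix_append cur.reverse (c :: rest))).isInfix
    · simp only [PySem.Chars.split₀.go, hsp, Bool.false_eq_true, if_false] at h
      rcases ih (c :: cur) acc w h with h' | h'
      · exact Or.inl h'
      · refine Or.inr ?_
        simpa using h'

theorem pv_mem_split₀_infix {w s : List Char} (h : w ∈ PySem.Chars.split₀ s) : w <:+: s := by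
  rcases pv_go_mem s [] [] w h with h' | h'
  · simp at h'
  · simpa using h'

-- strip result whose chars are all whitespace is empty
theorem pv_strip_allspace {t : List Char}
    (h : ∀ c ∈ PySem.Chars.strip t, PySem.Chars.isspace c = true) : PySem.Chars.strip t = [] := by
  rcases he : PySem.Chars.strip t with _ | ⟨c, rest⟩
  · rfl
  · exfalso
    have hpref : PySem.Chars.strip t <+: PySem.Chars.lstrip t := by
      unfold PySem.Chars.strip PySem.Chars.rstrip
      rw [← List.reverse_suffix]
      simpa using List.dropWhile_suffix _
    rw [he] at hpref
    rcases hpref with ⟨tail, htail⟩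
    have hne : List.dropWhile PySem.Chars.isspace t ≠ [] := by
      unfold PySem.Chars.lstrip at htail
      rw [← htail]; simp
    have hhead : PySem.Chars.isspace c = false := by
      have := List.head_dropWhile_not (p := PySem.Chars.isspace) (l := t) hne
      unfold PySem.Chars.lstrip at htail
      have hh : (List.dropWhile PySem.Chars.isspace t).head hne = c := by
        simp [← htail]
      rw [hh] at this
      simpa using this
    have := h c (by rw [he]; simp)
    rw [this] at hhead; cases hhead

theorem pv_foldl_count (l : List String) (p : String → Bool) (n : Nat) :
    l.foldl (fun acc w => acc + (if p w then 1 else 0)) n = n + (l.filter p).length := by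
  induction l generalizing n with
  | nil => simp
  | cons x xs ih =>
    simp only [List.foldl_cons, List.filter_cons]
    by_cases hp : p x = true
    · rw [if_pos hp, if_pos hp, ih]; simp; omega
    · rw [if_neg hp, if_neg (by simp [hp]), ih]; omega

theorem pv_all_words (cue summ w : String) (h1 : PySem.Str.isIn cue summ = true)
    (hw : w ∈ PySem.Str.split₀ cue) : PySem.Str.isIn w summ = true := by
  have hmem : w.toList ∈ PySem.Chars.split₀ cue.toList := by
    rw [← PySem.Str.split₀_map_toList]
    exact List.mem_map_of_mem hw
  have hinf : w.toList <:+: cue.toList := pv_mem_split₀_infix hmem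
  exact (PySem.Str.isIn_iff_infix w summ).mpr
    (hinf.trans ((PySem.Str.isIn_iff_infix cue summ).mp h1))

theorem pv_words_ne_nil (ct : String)
    (h : PySem.Str.split₀ (PySem.Str.strip (PySem.Str.lower ct)) = []) :
    (PySem.Str.strip (PySem.Str.lower ct)).toList = [] := by
  have hmap := PySem.Str.split₀_map_toList (PySem.Str.strip (PySem.Str.lower ct))
  rw [h] at hmap
  rw [PySem.Str.toList_strip] at hmap ⊢
  exact pv_strip_allspace (pv_go_nil_allspace _ [] [] hmap.symm)

theorem pv_alt_nil (a s c : String)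
    (h : PySem.Str.split₀ (PySem.Str.strip (PySem.Str.lower c)) = []) :
    calculate_preservation_status_alt a s c = "Yes" := by
  simp only [calculate_preservation_status_alt, h]

theorem pv_alt_cons (a s c w0 : String) (rest : List String)
    (h : PySem.Str.split₀ (PySem.Str.strip (PySem.Str.lower c)) = w0 :: rest) :
    calculate_preservation_status_alt a s c =
      rest.foldl (pvStep (fun w => PySem.Str.isIn w (PySem.Str.lower s)))
        (if PySem.Str.isIn w0 (PySem.Str.lower s) then "Yes" else "No") := by
  simp only [calculate_preservation_status_alt, h]
  rfl

theorem pv_cue_nonempty (summary_text cue_text : String)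
    (h1 : ¬ PySem.Str.isIn (PySem.Str.strip (PySem.Str.lower cue_text)) (PySem.Str.lower summary_text) = true) :
    PySem.Str.split₀ (PySem.Str.strip (PySem.Str.lower cue_text)) ≠ [] := by
  intro hw
  have hnil := pv_words_ne_nil cue_text hw
  apply h1
  apply (PySem.Str.isIn_iff_infix _ _).mpr
  rw [hnil]
  exact List.nil_infix

set_option maxHeartbeats 1000000 in
theorem pv_main (article_text summary_text cue_text : String)
    (hnd : ¬ D_calculate_preservation_status article_text summary_text cue_text) :
    calculate_preservation_status article_text summary_text cue_text = calculate_preservation_status_alt article_text summary_text cue_text := by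
  unfold calculate_preservation_status
  dsimp only
  by_cases h1 : PySem.Str.isIn (PySem.Str.strip (PySem.Str.lower cue_text)) (PySem.Str.lower summary_text) = true
  · rw [if_pos h1]
    rcases hsp : PySem.Str.split₀ (PySem.Str.strip (PySem.Str.lower cue_text)) with _ | ⟨w0, rest⟩
    · exact (pv_alt_nil article_text summary_text cue_text hsp).symm
    · rw [pv_alt_cons article_text summary_text cue_text w0 rest hsp]
      have hall : ∀ w ∈ w0 :: rest, PySem.Str.isIn w (PySem.Str.lower summary_text) = true := by
        intro w hw
        exact pv_all_words _ _ w h1 (by rw [hsp]; exact hw)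
      rw [if_pos (hall w0 (by simp))]
      exact (pv_fold_yes _ rest (fun w hw => hall w (by simp [hw]))).symm
  · rw [if_neg h1]
    rcases hsp : PySem.Str.split₀ (PySem.Str.strip (PySem.Str.lower cue_text)) with _ | ⟨w0, rest⟩
    · exact absurd hsp (pv_cue_nonempty summary_text cue_text h1)
    · rw [pv_alt_cons article_text summary_text cue_text w0 rest hsp]
      by_cases h2 : PySem.Str.isIn " " (PySem.Str.strip (PySem.Str.lower cue_text)) = true
      · rw [if_pos h2, pv_foldl_count _ (fun w => PySem.Str.isIn w (PySem.Str.lower summary_text)), Nat.zero_add]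
        by_cases hall : ∀ w ∈ w0 :: rest, PySem.Str.isIn w (PySem.Str.lower summary_text) = true
        · have hfil : (w0 :: rest).filter (fun w => PySem.Str.isIn w (PySem.Str.lower summary_text)) = w0 :: rest :=
            List.filter_eq_self.mpr hall
          rw [hfil, if_pos (beq_self_eq_true _), if_pos (hall w0 (by simp))]
          exact (pv_fold_yes _ rest (fun w hw => hall w (by simp [hw]))).symm
        · by_cases hnone : ∀ w ∈ w0 :: rest, PySem.Str.isIn w (PySem.Str.lower summary_text) = false
          · have hfil : (w0 :: rest).filter (fun w => PySem.Str.isIn w (PySem.Str.lower summary_text)) = [] :=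
              List.filter_eq_nil_iff.mpr (fun w hw => by rw [hnone w hw]; simp)
            rw [hfil]
            rw [if_neg (by simp), if_neg (by simp)]
            rw [if_neg (by rw [hnone w0 (by simp)]; simp)]
            exact (pv_fold_no _ rest (fun w hw => hnone w (by simp [hw]))).symm
          · push_neg at hall hnone
            obtain ⟨vf, hvf, hvf1⟩ := hall
            obtain ⟨vt, hvt, hvt1⟩ := hnone
            have hvf2 : PySem.Str.isIn vf (PySem.Str.lower summary_text) = false := Bool.eq_false_iff.mpr hvf1
            have hvt2 : PySem.Str.isIn vt (PySem.Str.lower summary_text) = true := by simpa using hvt1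
            have hlt : ((w0 :: rest).filter (fun w => PySem.Str.isIn w (PySem.Str.lower summary_text))).length ≠ (w0 :: rest).length := by
              intro he
              have hself : (w0 :: rest).filter (fun w => PySem.Str.isIn w (PySem.Str.lower summary_text)) = w0 :: rest :=
                List.filter_sublist.eq_of_length he
              have := List.filter_eq_self.mp hself vf hvf
              rw [hvf2] at this; cases this
            have hmemf : vt ∈ (w0 :: rest).filter (fun w => PySem.Str.isIn w (PySem.Str.lower summary_text)) :=
              List.mem_filter.mpr ⟨hvt, hvt2⟩
            have hpos : 0 < ((w0 :: rest).filter (fun w => PySem.Str.isIn w (PySem.Str.lower summary_text))).length :=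
              List.length_pos_iff.mpr (fun hnil => by rw [hnil] at hmemf; simp at hmemf)
            rw [if_neg (by simpa using hlt), if_pos hpos]
            by_cases hw0 : PySem.Str.isIn w0 (PySem.Str.lower summary_text) = true
            · rw [if_pos hw0]
              have hvf_rest : vf ∈ rest := by
                rcases List.mem_cons.mp hvf with rfl | h
                · rw [hw0] at hvf2; cases hvf2
                · exact h
              exact (pv_fold_part_of_false _ rest ⟨vf, hvf_rest, hvf2⟩).symm
            · rw [if_neg hw0]
              have hvt_rest : vt ∈ rest := by
                rcases List.mem_cons.mp hvt with rfl | h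
                · exact absurd hvt2 hw0
                · exact h
              exact (pv_fold_part_of_true _ rest ⟨vt, hvt_rest, hvt2⟩).symm
      · rw [if_neg h2]
        have h1' : PySem.Str.isIn (PySem.Str.strip (PySem.Str.lower cue_text)) (PySem.Str.lower summary_text) = false := Bool.eq_false_iff.mpr h1
        have h2' : PySem.Str.isIn " " (PySem.Str.strip (PySem.Str.lower cue_text)) = false := Bool.eq_false_iff.mpr h2
        have hno : ∀ w ∈ w0 :: rest, PySem.Str.isIn w (PySem.Str.lower summary_text) = false := by
          intro w hw
          cases hx : PySem.Str.isIn w (PySem.Str.lower summary_text) with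
          | false => rfl
          | true => exact absurd ⟨h2', h1', w, by rw [hsp]; exact hw, hx⟩ hnd
        rw [if_neg (by rw [hno w0 (by simp)]; simp)]
        exact (pv_fold_no _ rest (fun w hw => hno w (by simp [hw]))).symm

theorem pv_tight (article_text summary_text cue_text : String)
    (hD : D_calculate_preservation_status article_text summary_text cue_text) :
    calculate_preservation_status article_text summary_text cue_text ≠ calculate_preservation_status_alt article_text summary_text cue_text := by
  obtain ⟨h2, h1, w, hw, hmatch⟩ := hD
  have hA : calculate_preservation_status article_text summary_text cue_text = "No" := by
    unfold calculate_preservation_status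
    rw [if_neg (by rw [h1]; exact Bool.false_ne_true), if_neg (by rw [h2]; exact Bool.false_ne_true)]
  rw [hA]
  intro hB
  rcases hsp : PySem.Str.split₀ (PySem.Str.strip (PySem.Str.lower cue_text)) with _ | ⟨w0, rest⟩
  · rw [hsp] at hw; simp at hw
  · rw [pv_alt_cons article_text summary_text cue_text w0 rest hsp] at hB
    obtain ⟨hst, hrest⟩ := pv_fold_eq_no _ rest _ hB.symm
    have hw0 : PySem.Str.isIn w0 (PySem.Str.lower summary_text) = false := by
      by_cases hx : PySem.Str.isIn w0 (PySem.Str.lower summary_text) = true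
      · rw [if_pos hx] at hst; simp at hst
      · exact Bool.eq_false_iff.mpr hx
    rw [hsp] at hw
    rcases List.mem_cons.mp hw with rfl | hw2
    · rw [hmatch] at hw0; cases hw0
    · have := hrest w hw2
      rw [hmatch] at this; cases this

-- ===== VERDICT (by name: the statement is the Claim_ definition above) =====
theorem calculate_preservation_status_spec : Claim_unchanged_calculate_preservation_status := by
  intro article_text summary_text cue_text _dom hnd
  exact pv_main article_text summary_text cue_text hnd
theorem calculate_preservation_status_changed : Claim_changed_calculate_preservation_status := by
  unfold Claim_changed_calculate_preservation_status; decide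
theorem calculate_preservation_status_tight : Claim_exact_calculate_preservation_status := by
  intro article_text summary_text cue_text _dom hD
  exact pv_tight article_text summary_text cue_text hD
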